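-- pv_equiv track=rewrite | github.com/ritz-lang/rz | projects/ritz/tools/check_no_s_strings.py | strip_string_content
-- ===== SOURCE A (Python) =====
-- def strip_string_content(line: str) -> str:
--     """Return the line with the *contents* of every `"..."` / `c"..."`
--     string literal blanked out, so occurrences of `s"` inside string
--     contents don't trip the regex below. Preserves quote characters so
--     we don't accidentally fuse adjacent lexemes.
--     """
--     out = []
--     i = 0
--     n = len(line)
--     while i < n:
--         ch = line[i]
--         if ch == '"':
--             # Copy the opening quote, then scan until the matching quote,
--             # replacing interior characters with spaces.
--             out.append(ch)
--             i += 1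
--             while i < n:
--                 c = line[i]
--                 if c == '\\' and i + 1 < n:
--                     out.append('  ')  # preserve column width
--                     i += 2
--                     continue
--                 if c == '"':
--                     out.append(c)
--                     i += 1
--                     break
--                 out.append(' ')
--                 i += 1
--         elif ch == '#':
--             # Comment: blank the rest of the line.
--             out.append(' ' * (n - i))
--             break
--         else:
--             out.append(ch)
--             i += 1
--     return ''.join(out)
-- ===== SOURCE B (Python) =====
-- def strip_string_content(line: str) -> str:
--     """Single-pass state machine: 0 = normal, 1 = inside a string,
--     2 = inside a string right after a backslash."""
--     out = []
--     state = 0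
--     for idx, ch in enumerate(line):
--         if state == 0:
--             if ch == '#':
--                 out.append(' ' * (len(line) - idx))
--                 break
--             out.append(ch)
--             if ch == '"':
--                 state = 1
--         elif state == 1:
--             if ch == '"':
--                 out.append('"')
--                 state = 0
--             elif ch == '\\':
--                 out.append(' ')
--                 state = 2
--             else:
--                 out.append(' ')
--         else:
--             out.append(' ')
--             state = 1
--     return ''.join(out)
-- ===== Notes on version B (the rewrite author's own statement) =====
-- stated objective: simpler
-- what changed: Replaced A's nested index-based while loops (inner loop scanning to the closing quote with two-character escape skips) by a single left-to-right pass driven by a three-state machine (normal / in-string / in-string-after-backslash) with no inner loop and no index arithmetic.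
import Mathlib
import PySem

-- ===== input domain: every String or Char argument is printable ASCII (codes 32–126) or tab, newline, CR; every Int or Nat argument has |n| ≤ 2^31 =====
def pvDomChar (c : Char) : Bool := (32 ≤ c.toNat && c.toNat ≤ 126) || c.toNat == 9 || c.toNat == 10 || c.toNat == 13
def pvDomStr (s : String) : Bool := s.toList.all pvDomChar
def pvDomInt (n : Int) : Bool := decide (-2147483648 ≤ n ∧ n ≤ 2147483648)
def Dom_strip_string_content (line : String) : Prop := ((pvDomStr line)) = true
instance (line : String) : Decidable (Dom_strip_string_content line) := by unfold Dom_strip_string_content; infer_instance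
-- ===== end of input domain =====

-- B replaces A's nested index-based while loops by a single-pass three-state machine
-- over the characters (simpler: one loop, no inner loop, no index arithmetic); return value proved equal.

-- ===== PORT A =====
-- A's outer while loop, consuming the suffix of `line` at index i; the inner
-- string-scanning while loop is the mutually recursive stripAStr.
mutual
  def stripA : List Char → List Char
    | [] => []
    | ch :: rest =>
      if ch = '"' then ch :: stripAStr rest
      else if ch = '#' then List.replicate (rest.length + 1) ' '   -- ' ' * (n - i), then break
      else ch :: stripA rest
  termination_by l => l.length

  -- A's inner loop: `c == '\\' and i + 1 < n` appends two spaces and skips two chars.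
  def stripAStr : List Char → List Char
    | [] => []
    | c :: rest =>
      if c = '\\' ∧ rest ≠ [] then ' ' :: ' ' :: stripAStr rest.tail
      else if c = '"' then c :: stripA rest   -- closing quote: break back to the outer loop
      else ' ' :: stripAStr rest
  termination_by l => l.length
  decreasing_by all_goals simp [List.length_tail]
end

def strip_string_content (line : String) : String :=
  String.mk (stripA line.toList)

-- ===== PORT B =====
-- B's single for-loop with a state variable: 0 = normal, 1 = in string, 2 = in string after '\'.
-- `len(line) - idx` in B's comment branch is the length of the remaining suffix incl. the current char.
def stripB (state : Nat) : List Char → List Char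
  | [] => []
  | ch :: rest =>
    if state = 0 then
      if ch = '#' then List.replicate (rest.length + 1) ' '
      else ch :: stripB (if ch = '"' then 1 else 0) rest
    else if state = 1 then
      if ch = '"' then '"' :: stripB 0 rest
      else if ch = '\\' then ' ' :: stripB 2 rest
      else ' ' :: stripB 1 rest
    else ' ' :: stripB 1 rest

def strip_string_content_alt (line : String) : String :=
  String.mk (stripB 0 line.toList)

-- ===== PRECONDITION & SPEC =====
def Spec_strip_string_content (line : String) (out : String) : Prop := out = strip_string_content_alt line
instance (line : String) (out : String) : Decidable (Spec_strip_string_content line out) := by unfold Spec_strip_string_content; infer_instance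

-- ===== CLAIM (what is proved, stated in full; the proofs are below) =====
def Claim_equal_strip_string_content : Prop := ∀ (line : String), Dom_strip_string_content line → Spec_strip_string_content line (strip_string_content line)

-- ===== LEMMAS AND PROOFS =====
theorem stripA_eq_stripB : ∀ (n : Nat) (l : List Char), l.length ≤ n →
    stripA l = stripB 0 l ∧ stripAStr l = stripB 1 l := by
  intro n
  induction n with
  | zero =>
    intro l hl
    have : l = [] := List.eq_nil_of_length_eq_zero (Nat.le_zero.mp hl)
    subst this
    exact ⟨by rw [stripA.eq_def]; rfl, by rw [stripAStr.eq_def]; rfl⟩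
  | succ n ih =>
    intro l hl
    match l with
    | [] => exact ⟨by rw [stripA.eq_def]; rfl, by rw [stripAStr.eq_def]; rfl⟩
    | ch :: rest =>
      have hr : rest.length ≤ n := by simp at hl; omega
      constructor
      · -- outer loop vs state 0
        rw [stripA.eq_def]
        by_cases hq : ch = '"'
        · simp [stripB, hq, (ih rest hr).2]
        · by_cases hh : ch = '#'
          · simp [stripB, hh]
          · simp [stripB, hq, hh, (ih rest hr).1]
      · -- inner string loop vs state 1 (state 2 is unfolded inline)
        rw [stripAStr.eq_def]
        by_cases hb : ch = '\\' ∧ rest ≠ []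
        · obtain ⟨hb1, hb2⟩ := hb
          match rest with
          | [] => exact absurd rfl hb2
          | d :: rest' =>
            have hr' : rest'.length ≤ n := by simp at hl; omega
            simp [stripB, hb1, (ih rest' hr').2]
        · by_cases hq : ch = '"'
          · simp [stripB, hq, (ih rest hr).1]
          · by_cases hc : ch = '\\'
            · -- then rest = [] : A appends one space; B enters state 2 with nothing left
              have hre : rest = [] := by
                by_contra h; exact hb ⟨hc, h⟩
              subst hre
              simp [stripB, hq, hc]
              rw [stripAStr.eq_def]
            · simp [stripB, hb, hq, hc, (ih rest hr).2]

-- ===== VERDICT (by name: the statement is the Claim_ definition above) =====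
theorem strip_string_content_spec : Claim_equal_strip_string_content := by
  intro line _
  unfold Spec_strip_string_content strip_string_content strip_string_content_alt
  exact congrArg String.mk (stripA_eq_stripB line.toList.length line.toList le_rfl).1
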